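-- pv_equiv track=rewrite | github.com/Shreyashmohadikar/Cpp | Training/TCS_A.py | solve
-- ===== SOURCE A (Python) =====
-- def solve(S1, S2):
--     n = len(S1)
--     S2 = S2 + S2[::-1]
--     i = 0
--     ans = []
--     while i < n:
--         j = i
--         while j < n and S1[i:j+1] in S2:
--             j += 1
--         if j == i:
--             return "Impossible"
--         ans.append(S1[i:j])
--         i = j
--     return '|'.join(ans)
-- ===== SOURCE B (Python) =====
-- def solve(S1, S2):
--     # Same greedy chunking, but each chunk's length is found by exponential
--     # (doubling) search followed by binary search, instead of A's
--     # one-character-at-a-time extension that re-tests every intermediate length.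
--     n = len(S1)
--     T = S2 + S2[::-1]
--     i = 0
--     ans = []
--     while i < n:
--         if S1[i:i+1] not in T:
--             return "Impossible"
--         k = 1
--         while i + 2*k <= n and S1[i:i+2*k] in T:
--             k *= 2
--         lo, hi = i + k, min(n, i + 2*k - 1)
--         while lo < hi:
--             mid = (lo + hi + 1) // 2
--             if S1[i:mid] in T:
--                 lo = mid
--             else:
--                 hi = mid - 1
--         ans.append(S1[i:lo])
--         i = lo
--     return '|'.join(ans)
-- ===== Notes on version B (the rewrite author's own statement) =====
-- stated objective: alternative
-- what changed: Each greedy chunk's length is found by exponential (doubling) search plus binary search over the end index (valid because substring-of-T is closed under taking prefixes), replacing A's one-character-at-a-time extension that runs a substring test for every intermediate chunk length; B makes O(log L) substring tests per chunk instead of A's L+1, trading them for more failing (full-scan) tests.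
import Mathlib
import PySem

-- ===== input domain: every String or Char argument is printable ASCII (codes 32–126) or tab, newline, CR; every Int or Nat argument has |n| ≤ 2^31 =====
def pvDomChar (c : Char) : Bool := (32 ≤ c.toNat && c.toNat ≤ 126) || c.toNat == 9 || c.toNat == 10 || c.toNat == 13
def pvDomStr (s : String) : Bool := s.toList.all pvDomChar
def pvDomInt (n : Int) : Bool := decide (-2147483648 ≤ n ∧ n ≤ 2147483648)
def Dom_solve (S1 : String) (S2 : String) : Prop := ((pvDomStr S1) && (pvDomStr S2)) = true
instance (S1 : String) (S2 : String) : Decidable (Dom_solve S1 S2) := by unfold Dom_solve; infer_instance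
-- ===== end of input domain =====

-- B replaces A's per-chunk one-char-at-a-time extension by a binary search for the chunk end
-- (substring-of-T is prefix-closed); proved to return the same string on every input.

-- ===== PORT A =====
-- inner: `while j < n and S1[i:j+1] in S2: j += 1`; fuel bounds the iterations (n - j each call)
def solveAInner (s t : List Char) (n i : Nat) : Nat → Nat → Nat
  | j, 0 => j
  | j, fuel+1 =>
    if j < n ∧ PySem.Chars.isIn (PySem.List.slice s (some (i : Int)) (some ((j : Int) + 1))) t then
      solveAInner s t n i (j+1) fuel
    else j

-- outer: `while i < n: …`; `none` = the `return "Impossible"` path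
def solveAOuter (s t : List Char) (n : Nat) : Nat → Nat → List (List Char) → Option (List (List Char))
  | 0, _, ans => some ans
  | fuel+1, i, ans =>
    if i < n then
      let j := solveAInner s t n i i (n - i)
      if j = i then none
      else solveAOuter s t n fuel j (ans ++ [PySem.List.slice s (some (i : Int)) (some (j : Int))])
    else some ans

def solve (S1 : String) (S2 : String) : String :=
  -- n = len(S1); S2 = S2 + S2[::-1]; the outer while-loop with fuel n+1 (i strictly increases)
  match solveAOuter S1.toList (S2.toList ++ S2.toList.reverse) S1.toList.length
      (S1.toList.length + 1) 0 [] with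
  | none => "Impossible"
  | some ans => String.ofList (PySem.Chars.join ['|'] ans)

-- ===== PORT B =====
-- doubling search: `k = 1; while i + 2*k <= n and S1[i:i+2*k] in T: k *= 2`
def solveBGallop (s t : List Char) (n i : Nat) : Nat → Nat → Nat
  | k, 0 => k
  | k, fuel+1 =>
    if i + 2*k ≤ n ∧ PySem.Chars.isIn (PySem.List.slice s (some (i : Int)) (some ((i + 2*k : Nat) : Int))) t then
      solveBGallop s t n i (2*k) fuel
    else k

-- binary search: `while lo < hi: mid = (lo+hi+1)//2; if S1[i:mid] in T: lo = mid else: hi = mid-1`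
def solveBSearch (s t : List Char) (i : Nat) : Nat → Nat → Nat → Nat
  | lo, _, 0 => lo
  | lo, hi, fuel+1 =>
    if lo < hi then
      let mid := (lo + hi + 1) / 2
      if PySem.Chars.isIn (PySem.List.slice s (some (i : Int)) (some (mid : Int))) t then
        solveBSearch s t i mid hi fuel
      else
        solveBSearch s t i lo (mid - 1) fuel
    else lo

-- outer: `while i < n:` char test, doubling search, binary search, append chunk
def solveBOuter (s t : List Char) (n : Nat) : Nat → Nat → List (List Char) → Option (List (List Char))
  | 0, _, ans => some ans
  | fuel+1, i, ans =>
    if i < n then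
      if PySem.Chars.isIn (PySem.List.slice s (some (i : Int)) (some ((i + 1 : Nat) : Int))) t = false then
        none
      else
        let k := solveBGallop s t n i 1 n
        let lo := solveBSearch s t i (i + k) (min n (i + 2*k - 1)) n
        solveBOuter s t n fuel lo (ans ++ [PySem.List.slice s (some (i : Int)) (some (lo : Int))])
    else some ans

def solve_alt (S1 : String) (S2 : String) : String :=
  match solveBOuter S1.toList (S2.toList ++ S2.toList.reverse) S1.toList.length
      (S1.toList.length + 1) 0 [] with
  | none => "Impossible"
  | some ans => String.ofList (PySem.Chars.join ['|'] ans)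

-- ===== PRECONDITION & SPEC =====
def Spec_solve (S1 : String) (S2 : String) (out : String) : Prop := out = solve_alt S1 S2
instance (S1 : String) (S2 : String) (out : String) : Decidable (Spec_solve S1 S2 out) := by unfold Spec_solve; infer_instance

-- ===== CLAIM (what is proved, stated in full; the proofs are below) =====
def Claim_equal_solve : Prop := ∀ (S1 : String) (S2 : String), Dom_solve S1 S2 → Spec_solve S1 S2 (solve S1 S2)

-- ===== LEMMAS AND PROOFS =====

-- P s t i k: the length-k prefix of S1[i:] is a substring of T
def chunkP (s t : List Char) (i k : Nat) : Prop := ((s.drop i).take k) <:+: t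

lemma chunkP_zero (s t : List Char) (i : Nat) : chunkP s t i 0 := by
  simp [chunkP]

lemma chunkP_mono (s t : List Char) (i : Nat) {k m : Nat} (hkm : k ≤ m)
    (h : chunkP s t i m) : chunkP s t i k := by
  unfold chunkP at *
  have hpre : (s.drop i).take k <+: (s.drop i).take m := by
    have := List.take_prefix k ((s.drop i).take m)
    rwa [List.take_take, min_eq_left hkm] at this
  exact hpre.isInfix.trans h

-- the greedy stopping point: substring holds at j - i, and either j = n or it fails one longer
def chunkGood (s t : List Char) (n i j : Nat) : Prop :=
  i ≤ j ∧ j ≤ n ∧ chunkP s t i (j - i) ∧ (j = n ∨ ¬ chunkP s t i (j - i + 1))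

lemma chunkGood_unique (s t : List Char) (n i : Nat) {j1 j2 : Nat}
    (h1 : chunkGood s t n i j1) (h2 : chunkGood s t n i j2) : j1 = j2 := by
  obtain ⟨hi1, hn1, hp1, hb1⟩ := h1
  obtain ⟨hi2, hn2, hp2, hb2⟩ := h2
  by_contra hne
  rcases Nat.lt_or_ge j1 j2 with hlt | hge
  · rcases hb1 with h | h
    · omega
    · exact h (chunkP_mono s t i (by omega) hp2)
  · rcases hb2 with h | h
    · omega
    · have hlt : j2 < j1 := by omega
      exact h (chunkP_mono s t i (by omega) hp1)

lemma slice_eq_take_drop (s : List Char) (i m : Nat) :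
    PySem.List.slice s (some (i : Int)) (some (m : Int)) = (s.drop i).take (m - i) := by
  simpa using PySem.List.slice_natCast s i m

lemma isIn_slice_iff (s t : List Char) (i m : Nat) :
    PySem.Chars.isIn (PySem.List.slice s (some (i : Int)) (some (m : Int))) t = true
      ↔ chunkP s t i (m - i) := by
  rw [slice_eq_take_drop]
  exact PySem.Chars.isIn_iff_infix _ _

lemma solveAInner_good (s t : List Char) (n i : Nat) :
    ∀ (fuel j : Nat), i ≤ j → j ≤ n → n - j ≤ fuel → chunkP s t i (j - i) →
      chunkGood s t n i (solveAInner s t n i j fuel) := by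
  intro fuel
  induction fuel with
  | zero =>
    intro j hij hjn hf hp
    have hjn' : j = n := by omega
    exact ⟨by simpa [solveAInner], by simpa [solveAInner], by simpa [solveAInner] using hp,
      Or.inl (by simpa [solveAInner])⟩
  | succ fuel ih =>
    intro j hij hjn hf hp
    rw [solveAInner]
    by_cases hc : j < n ∧ PySem.Chars.isIn (PySem.List.slice s (some (i : Int)) (some ((j : Int) + 1))) t
    · rw [if_pos hc]
      have hin : PySem.Chars.isIn (PySem.List.slice s (some (i : Int)) (some ((j + 1 : Nat) : Int))) t = true := by
        have := hc.2
        push_cast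
        simpa using this
      have hp' : chunkP s t i (j + 1 - i) := (isIn_slice_iff s t i (j+1)).mp hin
      exact ih (j+1) (by omega) (by omega) (by omega) hp'
    · rw [if_neg hc]
      rcases Nat.lt_or_ge j n with hlt | hge
      · have hnin : ¬ PySem.Chars.isIn (PySem.List.slice s (some (i : Int)) (some ((j : Int) + 1))) t := by
          intro h; exact hc ⟨hlt, h⟩
      -- translate the failed test into ¬ chunkP at j - i + 1
        refine ⟨hij, hjn, hp, Or.inr ?_⟩
        intro hP
        apply hnin
        have : PySem.Chars.isIn (PySem.List.slice s (some (i : Int)) (some ((j + 1 : Nat) : Int))) t = true := by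
          rw [isIn_slice_iff]
          have : j + 1 - i = j - i + 1 := by omega
          rw [this]; exact hP
        push_cast at this
        simpa using this
      · exact ⟨hij, hjn, hp, Or.inl (by omega)⟩

lemma solveBSearch_good (s t : List Char) (n i : Nat) :
    ∀ (fuel lo hi : Nat), i ≤ lo → lo ≤ hi → hi ≤ n → hi - lo ≤ fuel →
      chunkP s t i (lo - i) → (hi = n ∨ ¬ chunkP s t i (hi - i + 1)) →
      chunkGood s t n i (solveBSearch s t i lo hi fuel) := by
  intro fuel
  induction fuel with
  | zero =>
    intro lo hi hil hlh hhn hf hp hb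
    have : lo = hi := by omega
    subst this
    exact ⟨by simpa [solveBSearch], by simpa [solveBSearch], by simpa [solveBSearch] using hp,
      by simpa [solveBSearch] using hb⟩
  | succ fuel ih =>
    intro lo hi hil hlh hhn hf hp hb
    rw [solveBSearch]
    by_cases hlt : lo < hi
    · rw [if_pos hlt]
      have hmid1 : lo + 1 ≤ (lo + hi + 1) / 2 := by omega
      have hmid2 : (lo + hi + 1) / 2 ≤ hi := by omega
      by_cases hin : PySem.Chars.isIn (PySem.List.slice s (some (i : Int)) (some (((lo + hi + 1) / 2 : Nat) : Int))) t = true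
      · rw [if_pos hin]
        have hp' : chunkP s t i ((lo + hi + 1) / 2 - i) := (isIn_slice_iff s t i _).mp hin
        exact ih _ hi (by omega) (by omega) hhn (by omega) hp' hb
      · rw [if_neg hin]
        have hnp : ¬ chunkP s t i ((lo + hi + 1) / 2 - i) := fun h => hin ((isIn_slice_iff s t i _).mpr h)
        refine ih lo _ hil (by omega) (by omega) (by omega) hp (Or.inr ?_)
        have : (lo + hi + 1) / 2 - 1 - i + 1 = (lo + hi + 1) / 2 - i := by omega
        rw [this]; exact hnp
    · rw [if_neg hlt]
      have : lo = hi := by omega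
      subst this
      exact ⟨hil, hhn, hp, by simpa using hb⟩

lemma solveBGallop_good (s t : List Char) (n i : Nat) (hin : i < n) :
    ∀ (fuel k : Nat), 1 ≤ k → i + k ≤ n → n - k ≤ fuel → chunkP s t i k →
      1 ≤ solveBGallop s t n i k fuel ∧ i + solveBGallop s t n i k fuel ≤ n ∧
      chunkP s t i (solveBGallop s t n i k fuel) ∧
      (n < i + 2 * solveBGallop s t n i k fuel ∨ ¬ chunkP s t i (2 * solveBGallop s t n i k fuel)) := by
  intro fuel
  induction fuel with
  | zero =>
    intro k hk1 hkn hf hp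
    refine ⟨by simpa [solveBGallop] using hk1, by simpa [solveBGallop] using hkn,
      by simpa [solveBGallop] using hp, ?_⟩
    simp only [solveBGallop]
    left; omega
  | succ fuel ih =>
    intro k hk1 hkn hf hp
    rw [solveBGallop]
    by_cases hc : i + 2*k ≤ n ∧ PySem.Chars.isIn (PySem.List.slice s (some (i : Int)) (some ((i + 2*k : Nat) : Int))) t
    · rw [if_pos hc]
      have hp' : chunkP s t i (2*k) := by
        have := (isIn_slice_iff s t i (i + 2*k)).mp hc.2
        simpa [Nat.add_sub_cancel_left] using this
      exact ih (2*k) (by omega) hc.1 (by omega) hp'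
    · rw [if_neg hc]
      refine ⟨hk1, hkn, hp, ?_⟩
      by_cases hle : i + 2*k ≤ n
      · right
        intro hP
        apply hc
        refine ⟨hle, (isIn_slice_iff s t i (i + 2*k)).mpr ?_⟩
        simpa [Nat.add_sub_cancel_left] using hP
      · left; omega

lemma chunkP_one_iff (s t : List Char) (i : Nat) :
    PySem.Chars.isIn (PySem.List.slice s (some (i : Int)) (some ((i + 1 : Nat) : Int))) t = true
      ↔ chunkP s t i 1 := by
  rw [isIn_slice_iff]
  simp

-- B's chunk end (doubling then binary search) is the greedy stopping point
lemma solveB_chunk_good (s t : List Char) (n i : Nat) (hin : i < n)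
    (hp1 : chunkP s t i 1) :
    chunkGood s t n i
      (solveBSearch s t i (i + solveBGallop s t n i 1 n)
        (min n (i + 2 * solveBGallop s t n i 1 n - 1)) n) := by
  obtain ⟨hk1, hkn, hpk, hbk⟩ :=
    solveBGallop_good s t n i hin n 1 le_rfl (by omega) (by omega) hp1
  set k := solveBGallop s t n i 1 n with hk
  apply solveBSearch_good s t n i n (i + k) (min n (i + 2*k - 1))
  · omega
  · omega
  · omega
  · omega
  · simpa [Nat.add_sub_cancel_left] using hpk
  · rcases Nat.lt_or_ge (i + 2*k - 1) n with hlt | hge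
    · right
      have hmin : min n (i + 2*k - 1) = i + 2*k - 1 := by omega
      rw [hmin]
      have h2 : i + 2*k - 1 - i + 1 = 2*k := by omega
      rw [h2]
      rcases hbk with h | h
      · omega
      · exact h
    · left; omega

-- A's inner loop stops at the greedy stopping point, i ≤ n
lemma solveA_chunk_good (s t : List Char) (n i : Nat) (hi : i ≤ n) :
    chunkGood s t n i (solveAInner s t n i i (n - i)) :=
  solveAInner_good s t n i (n - i) i le_rfl hi (by omega) (by simpa using chunkP_zero s t i)

lemma outer_eq (s t : List Char) (n : Nat) :
    ∀ (fuel i : Nat) (ans : List (List Char)),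
      solveAOuter s t n fuel i ans = solveBOuter s t n fuel i ans := by
  intro fuel
  induction fuel with
  | zero => intro i ans; rfl
  | succ fuel ih =>
    intro i ans
    rw [solveAOuter, solveBOuter]
    by_cases hlt : i < n
    · rw [if_pos hlt, if_pos hlt]
      have hA := solveA_chunk_good s t n i (by omega)
      by_cases hp1 : chunkP s t i 1
      · -- the first character matches: neither side returns Impossible
        have hIn : PySem.Chars.isIn (PySem.List.slice s (some (i : Int)) (some ((i + 1 : Nat) : Int))) t = true :=
          (chunkP_one_iff s t i).mpr hp1
        rw [hIn]
        simp only [Bool.true_eq_false, if_false]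
        have hB := solveB_chunk_good s t n i hlt hp1
        have hEq := chunkGood_unique s t n i hA hB
        have hAi : solveAInner s t n i i (n - i) ≠ i := by
          intro h
          rcases hA.2.2.2 with hc | hc
          · omega
          · rw [h] at hc
            exact hc (by simpa using hp1)
        rw [if_neg hAi, hEq, ih]
      · -- the first character does not match: both return Impossible
        have hIn : PySem.Chars.isIn (PySem.List.slice s (some (i : Int)) (some ((i + 1 : Nat) : Int))) t = false := by
          rcases h : PySem.Chars.isIn (PySem.List.slice s (some (i : Int)) (some ((i + 1 : Nat) : Int))) t
          · rfl
          · exact absurd ((chunkP_one_iff s t i).mp h) hp1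
        rw [hIn]
        simp only [if_true]
        have hAi : solveAInner s t n i i (n - i) = i :=
          chunkGood_unique s t n i hA
            ⟨le_rfl, by omega, by simpa using chunkP_zero s t i, Or.inr (by simpa using hp1)⟩
        rw [if_pos hAi]
    · rw [if_neg hlt, if_neg hlt]

-- ===== VERDICT (by name: the statement is the Claim_ definition above) =====
theorem solve_spec : Claim_equal_solve := by
  intro S1 S2 _
  unfold Spec_solve solve solve_alt
  rw [outer_eq]
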